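-- pv_equiv track=rewrite | github.com/Aaramis/paragraphe_ranker | src/embedding_split.py | create_paragraphs_at_minimas
-- ===== SOURCE A (Python) =====
-- from typing import List
--
-- def create_paragraphs_at_minimas(sentences: List[str], minimas: List[int]) -> List[str]:
--     """
--     Create paragraphs at specified minimas in the list of sentences.
--
--     Parameters:
--     - sentences (List[str]): List of sentences.
--     - minimas (List[int]): List of indices where paragraphs should be created.
--
--     Returns:
--     - List[str]: List of paragraphs.
--     """
--     # Get the order number of the sentences which are in splitting points
--     split_points = [each for each in minimas[0]]
--
--     # Initialize variables
--     line = ""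
--     paragraphs = []
--
--     for num, each in enumerate(sentences):
--         # Check if sentence is a minima (splitting point)
--         if num in split_points:
--             # If it is, add a dot to the end of the sentence and start a new paragraph
--             line += f"{each}"
--             paragraphs.append(line)
--             line = ""
--         else:
--             # If it is a normal sentence, just add a dot to the end and keep adding sentences to the line
--             line += f"{each}. "
--
--     return paragraphs
-- ===== SOURCE B (Python) =====
-- from typing import List
--
-- def create_paragraphs_at_minimas(sentences: List[str], minimas: List[int]) -> List[str]:
--     """Index-first re-implementation: compute the sorted in-range boundary
--     indices once, then emit each paragraph as a '. '-join of the slice up to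
--     and including the boundary (leftover sentences after the last boundary
--     are dropped, as in the original)."""
--     n = len(sentences)
--     boundaries = sorted(set(s for s in minimas[0] if 0 <= s < n))
--     paragraphs = []
--     prev = 0
--     for s in boundaries:
--         paragraphs.append(". ".join(sentences[prev:s + 1]))
--         prev = s + 1
--     return paragraphs
-- ===== Notes on version B (the rewrite author's own statement) =====
-- stated objective: faster
-- what changed: Replaces the per-sentence string-accumulator loop (a linear membership test in the minima list at every sentence index) by computing the sorted set of in-range boundary indices once and emitting each paragraph as one '. '.join of a slice; Pre_ only excludes empty minimas, on which A raises IndexError (minimas[0]).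
import Mathlib
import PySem

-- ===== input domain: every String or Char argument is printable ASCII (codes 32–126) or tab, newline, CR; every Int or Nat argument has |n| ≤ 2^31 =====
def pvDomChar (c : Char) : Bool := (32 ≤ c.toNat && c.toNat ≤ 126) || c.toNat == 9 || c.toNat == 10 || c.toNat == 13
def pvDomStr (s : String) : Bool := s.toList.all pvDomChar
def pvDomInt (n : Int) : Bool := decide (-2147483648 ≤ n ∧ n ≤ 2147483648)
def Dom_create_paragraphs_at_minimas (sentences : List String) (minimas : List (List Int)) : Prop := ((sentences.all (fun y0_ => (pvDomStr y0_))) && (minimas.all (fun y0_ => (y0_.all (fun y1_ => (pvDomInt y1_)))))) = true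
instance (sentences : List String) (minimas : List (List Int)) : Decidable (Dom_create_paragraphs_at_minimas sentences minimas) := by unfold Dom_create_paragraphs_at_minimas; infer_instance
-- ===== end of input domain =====

-- ===== PORT A =====
-- B joins sentences into paragraphs at the sorted in-range boundary indices instead of
-- A's per-sentence accumulator loop; equal output everywhere A returns (Pre_: minimas ≠ []).
def create_paragraphs_at_minimas (sentences : List String) (minimas : List (List Int)) : List String :=
  match PySem.List.pyGet? minimas 0 with
  | none => []  -- minimas[0] raises IndexError; excluded by Pre_
  | some split_points =>
    ((PySem.List.enumerate sentences).foldl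
      (fun (st : String × List String) (p : Int × String) =>
        if p.1 ∈ split_points then ("", st.2 ++ [st.1 ++ p.2])
        else (st.1 ++ p.2 ++ ". ", st.2))
      ("", [])).2

-- ===== PORT B =====
def create_paragraphs_at_minimas_alt (sentences : List String) (minimas : List (List Int)) : List String :=
  match PySem.List.pyGet? minimas 0 with
  | none => []  -- minimas[0] raises IndexError; excluded by Pre_
  | some mins =>
    let n : Int := sentences.length
    let boundaries :=
      PySem.List.sorted (PySem.Set.ofList (mins.filter (fun s => decide (0 ≤ s ∧ s < n)))) (fun x => x)
    (boundaries.foldl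
      (fun (st : Int × List String) (s : Int) =>
        (s + 1, st.2 ++ [PySem.Str.join ". " (PySem.List.slice sentences (some st.1) (some (s + 1)))]))
      (0, [])).2

-- ===== PRECONDITION & SPEC =====
-- Pre_ excludes exactly the inputs where A raises: minimas = [] makes minimas[0] an IndexError.
def Pre_create_paragraphs_at_minimas (sentences : List String) (minimas : List (List Int)) : Prop :=
  minimas ≠ []
instance (sentences : List String) (minimas : List (List Int)) : Decidable (Pre_create_paragraphs_at_minimas sentences minimas) := by unfold Pre_create_paragraphs_at_minimas; infer_instance
def pvWitness_create_paragraphs_at_minimas : List String × List (List Int) :=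
  (["one", "two", "three"], [[1]])
def Spec_create_paragraphs_at_minimas (sentences : List String) (minimas : List (List Int)) (out : List String) : Prop := out = create_paragraphs_at_minimas_alt sentences minimas
instance (sentences : List String) (minimas : List (List Int)) (out : List String) : Decidable (Spec_create_paragraphs_at_minimas sentences minimas out) := by unfold Spec_create_paragraphs_at_minimas; infer_instance

-- ===== CLAIM (what is proved, stated in full; the proofs are below) =====
def Claim_equal_create_paragraphs_at_minimas : Prop := ∀ (sentences : List String) (minimas : List (List Int)), Dom_create_paragraphs_at_minimas sentences minimas → Pre_create_paragraphs_at_minimas sentences minimas → Spec_create_paragraphs_at_minimas sentences minimas (create_paragraphs_at_minimas sentences minimas)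

-- ===== LEMMAS AND PROOFS =====

-- String-level corollaries of the PySem.Chars join lemmas.
theorem strJoin_singleton (sep p : String) : PySem.Str.join sep [p] = p := by
  simp [PySem.Str.join, PySem.Chars.join_singleton]

theorem strJoin_cons_cons (sep p q : String) (rest : List String) :
    PySem.Str.join sep (p :: q :: rest) = p ++ sep ++ PySem.Str.join sep (q :: rest) := by
  simp [PySem.Str.join, PySem.Chars.join_cons_cons, String.append_assoc]

-- A's loop as a structural recursion (index-carrying form of the enumerate foldl).
def gA (sp : List Int) : List String → Int → String → List String → List String
  | [], _, _, acc => acc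
  | x :: xs, k, line, acc =>
      if k ∈ sp then gA sp xs (k + 1) "" (acc ++ [line ++ x])
      else gA sp xs (k + 1) (line ++ x ++ ". ") acc

theorem foldlA_eq_gA (sp : List Int) (rem : List String) (k : Int) (line : String)
    (acc : List String) :
    ((PySem.List.enumerate rem k).foldl
      (fun (st : String × List String) (p : Int × String) =>
        if p.1 ∈ sp then ("", st.2 ++ [st.1 ++ p.2])
        else (st.1 ++ p.2 ++ ". ", st.2))
      (line, acc)).2 = gA sp rem k line acc := by
  induction rem generalizing k line acc with
  | nil => simp [PySem.List.enumerate, gA]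
  | cons x xs ih =>
      rw [PySem.List.enumerate_cons]
      simp only [List.foldl_cons, gA]
      by_cases h : k ∈ sp <;> simp [h, ih]

-- B's loop as a structural recursion.
def gB (sentences : List String) : List Int → Int → List String → List String
  | [], _, acc => acc
  | s :: bs, prev, acc =>
      gB sentences bs (s + 1)
        (acc ++ [PySem.Str.join ". " (PySem.List.slice sentences (some prev) (some (s + 1)))])

theorem foldlB_eq_gB (sentences : List String) (bs : List Int) (prev : Int)
    (acc : List String) :
    (bs.foldl
      (fun (st : Int × List String) (s : Int) =>
        (s + 1, st.2 ++ [PySem.Str.join ". " (PySem.List.slice sentences (some st.1) (some (s + 1)))]))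
      (prev, acc)).2 = gB sentences bs prev acc := by
  induction bs generalizing prev acc with
  | nil => simp [gB]
  | cons s bs ih => simp [gB, ih]

-- If no index of the remaining segment is a split point, gA appends nothing.
theorem gA_no_split (sp : List Int) (rem : List String) (k : Int) (line : String)
    (acc : List String)
    (h : ∀ j : Int, k ≤ j → j < k + rem.length → j ∉ sp) :
    gA sp rem k line acc = acc := by
  induction rem generalizing k line acc with
  | nil => simp [gA]
  | cons x xs ih =>
      have hk : k ∉ sp := h k le_rfl (by push_cast [List.length_cons]; omega)
      simp only [gA, if_neg hk]
      exact ih (k + 1) _ acc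
        (fun j h1 h2 => h j (by omega) (by push_cast [List.length_cons] at h2 ⊢; omega))

-- Running gA from index k up to the first split point k+d yields one paragraph:
-- line ++ '. '.join(sentences[k : k+d+1]).
theorem gA_segment (sp : List Int) (sentences : List String) (d k : Nat) (line : String)
    (acc : List String)
    (hlt : k + d < sentences.length)
    (hno : ∀ j : Int, (k : Int) ≤ j → j < (k : Int) + d → j ∉ sp)
    (hsplit : ((k + d : Nat) : Int) ∈ sp) :
    gA sp (sentences.drop k) k line acc =
      gA sp (sentences.drop (k + d + 1)) ((k : Int) + d + 1) ""
        (acc ++ [line ++ PySem.Str.join ". " (List.take (d + 1) (sentences.drop k))]) := by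
  induction d generalizing k line acc with
  | zero =>
      have hk : k < sentences.length := by omega
      have hks : (k : Int) ∈ sp := by simpa using hsplit
      rw [List.drop_eq_getElem_cons hk]
      simp only [gA, if_pos hks]
      rw [List.take_succ_cons, List.take_zero, strJoin_singleton]
      norm_num
  | succ d ih =>
      have hk : k < sentences.length := by omega
      have hkn : (k : Int) ∉ sp := hno k le_rfl (by push_cast; omega)
      rw [List.drop_eq_getElem_cons hk]
      simp only [gA, if_neg hkn]
      have h1 : ((k : Int) + 1) = ((k + 1 : Nat) : Int) := by push_cast; ring
      rw [h1, ih (k + 1) (line ++ sentences[k] ++ ". ") acc (by omega)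
        (fun j hj1 hj2 => hno j (by push_cast at hj1 ⊢; omega) (by push_cast at hj2 ⊢; omega))
        (by rw [show (k + 1 + d : Nat) = k + (d + 1) from by omega]; exact hsplit)]
      have hne : List.take (d + 1) (List.drop (k + 1) sentences) ≠ [] := by
        apply List.ne_nil_of_length_pos
        simp only [List.length_take, List.length_drop]
        omega
      have hjoin : line ++ sentences[k] ++ ". " ++
          PySem.Str.join ". " (List.take (d + 1) (List.drop (k + 1) sentences)) =
          line ++ PySem.Str.join ". " (List.take (d + 1 + 1) (List.drop k sentences)) := by
        rw [List.drop_eq_getElem_cons hk, List.take_succ_cons]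
        obtain ⟨q, rest, hqr⟩ := List.exists_cons_of_ne_nil hne
        rw [hqr, strJoin_cons_cons]
        simp [String.append_assoc]
      rw [hjoin,
        show k + 1 + d + 1 = k + (d + 1) + 1 from by omega,
        show ((k + 1 : Nat) : Int) + d + 1 = (k : Int) + (d + 1 : Nat) + 1 from by push_cast; ring,
        List.drop_eq_getElem_cons hk]

-- Main bridge: gA over the tail from index k equals gB over the remaining boundaries,
-- provided the boundaries are exactly the split points in [k, n), strictly increasing.
theorem gA_eq_gB (sp : List Int) (sentences : List String) (bs : List Int) (k : Nat)
    (acc : List String)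
    (hkn : k ≤ sentences.length)
    (hsorted : bs.Pairwise (fun a b => a < b))
    (hbnd : ∀ b ∈ bs, (k : Int) ≤ b ∧ b < sentences.length)
    (hmem : ∀ j : Int, (k : Int) ≤ j → j < sentences.length → (j ∈ sp ↔ j ∈ bs)) :
    gA sp (sentences.drop k) (k : Int) "" acc = gB sentences bs (k : Int) acc := by
  induction bs generalizing k acc with
  | nil =>
      simp only [gB]
      refine gA_no_split sp _ _ _ _ (fun j h1 h2 => ?_)
      have hlen : (sentences.drop k).length = sentences.length - k := by simp
      rw [hlen] at h2
      have := hmem j h1 (by omega)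
      simp [this]
  | cons s bs ih =>
      have hs := hbnd s (List.mem_cons_self ..)
      have hd : ∃ d : Nat, s = (k : Int) + d ∧ k + d < sentences.length := by
        refine ⟨(s - k).toNat, by omega, by omega⟩
      obtain ⟨d, hsd, hdlt⟩ := hd
      have hpw := List.pairwise_cons.mp hsorted
      have hno : ∀ j : Int, (k : Int) ≤ j → j < (k : Int) + d → j ∉ sp := by
        intro j h1 h2 hj
        have hjbs := (hmem j h1 (by omega)).mp hj
        rcases List.mem_cons.mp hjbs with h | h
        · omega
        · have := hpw.1 j h; omega
      have hsplit : ((k + d : Nat) : Int) ∈ sp := by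
        refine (hmem _ (by push_cast; omega) (by push_cast; omega)).mpr ?_
        rw [show ((k + d : Nat) : Int) = s by push_cast; omega]
        exact List.mem_cons_self ..
      rw [gA_segment sp sentences d k "" acc hdlt hno hsplit]
      simp only [gB]
      have hslice : PySem.List.slice sentences (some ((k : Nat) : Int)) (some (s + 1)) =
          List.take (d + 1) (List.drop k sentences) := by
        rw [show s + 1 = ((k + d + 1 : Nat) : Int) from by omega, PySem.List.slice_natCast]
        congr 1
        omega
      rw [hslice, show s + 1 = ((k + d + 1 : Nat) : Int) from by omega,
        show (k : Int) + d + 1 = ((k + d + 1 : Nat) : Int) from by push_cast; ring]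
      exact ih (k + d + 1) _ (by omega) hpw.2
        (fun b hb => ⟨by have := hpw.1 b hb; push_cast; omega,
          (hbnd b (List.mem_cons_of_mem _ hb)).2⟩)
        (fun j h1 h2 => by
          rw [hmem j (by push_cast at h1 ⊢; omega) h2]
          constructor
          · intro h
            rcases List.mem_cons.mp h with h | h
            · exfalso; push_cast at h1; omega
            · exact h
          · exact fun h => List.mem_cons_of_mem _ h)

-- ===== VERDICT (by name: the statement is the Claim_ definition above) =====
theorem create_paragraphs_at_minimas_spec : Claim_equal_create_paragraphs_at_minimas := by
  intro sentences minimas _ hpre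
  obtain ⟨sp, rest, rfl⟩ : ∃ a l, minimas = a :: l := by
    cases minimas with
    | nil => exact absurd rfl hpre
    | cons a l => exact ⟨a, l, rfl⟩
  unfold Spec_create_paragraphs_at_minimas create_paragraphs_at_minimas create_paragraphs_at_minimas_alt
  rw [PySem.List.pyGet?_zero_cons]
  simp only
  rw [foldlA_eq_gA, foldlB_eq_gB]
  set n : Int := (sentences.length : Int) with hn
  set bs := PySem.List.sorted
      (PySem.Set.ofList (sp.filter (fun s => decide (0 ≤ s ∧ s < n)))) (fun x => x) with hbs
  have hmemb : ∀ j : Int, j ∈ bs ↔ (j ∈ sp ∧ 0 ≤ j ∧ j < n) := by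
    intro j
    rw [hbs, PySem.List.mem_sorted, PySem.Set.mem_ofList, List.mem_filter]
    simp
  have h0 : (0 : Int) = ((0 : Nat) : Int) := rfl
  rw [h0, show sentences = sentences.drop 0 from rfl]
  exact gA_eq_gB sp sentences bs 0 []
    (by omega)
    (by rw [hbs]; exact PySem.List.sorted_ofList_pairwise_lt _)
    (fun b hb => by have := (hmemb b).mp hb; exact ⟨by push_cast; omega, this.2.2⟩)
    (fun j h1 h2 => by rw [hmemb]; push_cast at h1; constructor
                       · exact fun h => ⟨h, h1, h2⟩
                       · exact fun h => h.1)
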